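-- pv_equiv track=rewrite | github.com/filip-husnik/pseudofinder | modules/selection.py | delim
-- ===== SOURCE A (Python) =====
-- def filter(list, items):
--     outLS = []
--     for i in list:
--         if i not in items:
--             outLS.append(i)
--     return outLS
--
-- def delim(line):
--     ls = []
--     string = ''
--     for i in line:
--         if i != " ":
--             string += i
--         else:
--             ls.append(string)
--             string = ''
--     ls = filter(ls, [""])
--     return ls
-- ===== SOURCE B (Python) =====
-- def delim(line):
--     parts = line.split(' ')
--     return [p for p in parts[:-1] if p != ""]
-- ===== Notes on version B (the rewrite author's own statement) =====
-- stated objective: idiomatic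
-- what changed: Replaced the char-by-char accumulate-and-flush state machine plus a second filter pass with library tokenization: split on ' ', drop the last piece (A never flushes its final buffer), and filter out empty tokens. (C-level str.split/slice/comprehension instead of per-character Python loop work).
import Mathlib
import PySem

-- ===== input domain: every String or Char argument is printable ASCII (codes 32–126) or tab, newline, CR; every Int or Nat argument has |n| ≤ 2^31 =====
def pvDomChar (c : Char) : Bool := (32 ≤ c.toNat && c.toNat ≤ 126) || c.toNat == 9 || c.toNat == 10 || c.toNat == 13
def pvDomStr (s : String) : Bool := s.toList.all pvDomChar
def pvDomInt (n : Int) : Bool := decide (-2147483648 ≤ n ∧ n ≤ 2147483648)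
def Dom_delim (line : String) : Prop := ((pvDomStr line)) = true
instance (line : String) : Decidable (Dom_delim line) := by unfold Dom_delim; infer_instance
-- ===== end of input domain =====

-- B replaces A's per-character accumulate-and-flush state machine (plus a second filter pass)
-- with library tokenization: split on ' ', drop the last piece (A never flushes its final
-- buffer), filter out empties — an idiomatic pipeline; equivalence of the RETURN value is proved.

-- ===== PORT A =====
-- A's helper 'filter(list, items)': append i when i not in items.
def pyfilter (list : List String) (items : List String) : List String :=
  list.foldl (fun outLS i => if i ∉ items then outLS ++ [i] else outLS) []

-- A's loop over the characters of line: state = (ls, string); 'string += i' is st.2 ++ [i],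
-- flush on ' ' appends String.ofList st.2 (strings are handled on the List Char side, as PySem prescribes).
def delim (line : String) : List String :=
  let st := line.toList.foldl
    (fun (st : List String × List Char) i =>
      if i ≠ ' ' then (st.1, st.2 ++ [i]) else (st.1 ++ [String.ofList st.2], []))
    ([], [])
  pyfilter st.1 [""]

-- ===== PORT B =====
-- parts = line.split(' ')  →  PySem.Str.split? (some, since the separator " " is non-empty);
-- parts[:-1]  →  PySem.List.slice parts none (some (-1));  the comprehension → List.filter.
def delim_alt (line : String) : List String :=
  match PySem.Str.split? line " " with
  | some parts => (PySem.List.slice parts none (some (-1))).filter (fun p => p != "")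
  | none => []

-- ===== PRECONDITION & SPEC =====
def Spec_delim (line : String) (out : List String) : Prop := out = delim_alt line
instance (line : String) (out : List String) : Decidable (Spec_delim line out) := by unfold Spec_delim; infer_instance

-- ===== CLAIM (what is proved, stated in full; the proofs are below) =====
def Claim_equal_delim : Prop := ∀ (line : String), Dom_delim line → Spec_delim line (delim line)

-- ===== LEMMAS AND PROOFS =====

-- Reference splitter: splitOn with single-space separator, accumulator kept reversed.
def mySplit : List Char → List Char → List (List Char)
  | [], cur => [cur.reverse]
  | c :: rest, cur => if c = ' ' then cur.reverse :: mySplit rest [] else mySplit rest (c :: cur)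

lemma go_eq (fuel : Nat) : ∀ (l cur : List Char) (acc : List (List Char)), l.length ≤ fuel →
    PySem.Chars.splitOn.go [' '] fuel l cur acc = acc.reverse ++ mySplit l cur := by
  induction fuel with
  | zero =>
    intro l cur acc h
    have : l = [] := by cases l <;> simp_all
    subst this
    simp [PySem.Chars.splitOn.go, mySplit]
  | succ n ih =>
    intro l cur acc h
    cases l with
    | nil => simp [PySem.Chars.splitOn.go, mySplit]
    | cons c rest =>
      by_cases hc : c = ' '
      · subst hc
        rw [show PySem.Chars.splitOn.go [' '] (n+1) (' '::rest) cur acc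
              = PySem.Chars.splitOn.go [' '] n rest [] (cur.reverse :: acc) from by
            simp [PySem.Chars.splitOn.go, List.isPrefixOf]]
        rw [ih rest [] (cur.reverse :: acc) (by simpa using Nat.le_of_succ_le_succ h)]
        simp [mySplit]
      · rw [show PySem.Chars.splitOn.go [' '] (n+1) (c::rest) cur acc
              = PySem.Chars.splitOn.go [' '] n rest (c :: cur) acc from by
            simp [PySem.Chars.splitOn.go, List.isPrefixOf, Ne.symm hc]]
        rw [ih rest (c :: cur) acc (by simpa using Nat.le_of_succ_le_succ h)]
        simp [mySplit, hc]

lemma splitOn_space (cs : List Char) : PySem.Chars.splitOn cs [' '] = mySplit cs [] := by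
  rw [PySem.Chars.splitOn, go_eq (cs.length + 1) cs [] [] (by omega)]
  simp

lemma mySplit_ne_nil (cs cur : List Char) : mySplit cs cur ≠ [] := by
  induction cs generalizing cur with
  | nil => simp [mySplit]
  | cons c rest ih => by_cases hc : c = ' ' <;> simp [mySplit, hc, ih]

-- A's loop flushes exactly the pieces of mySplit except the last (the never-flushed buffer).
lemma loop_eq (cs : List Char) : ∀ (ls : List String) (cur : List Char),
    (cs.foldl (fun (st : List String × List Char) i =>
      if i ≠ ' ' then (st.1, st.2 ++ [i]) else (st.1 ++ [String.ofList st.2], [])) (ls, cur)).1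
    = ls ++ ((mySplit cs cur.reverse).dropLast).map String.ofList := by
  induction cs with
  | nil => intro ls cur; simp [mySplit]
  | cons c rest ih =>
    intro ls cur
    by_cases hc : c = ' '
    · subst hc
      simp only [List.foldl_cons]
      rw [if_neg (fun h => h rfl), ih (ls ++ [String.ofList cur]) []]
      have hne := mySplit_ne_nil rest []
      simp [mySplit, List.dropLast_cons_of_ne_nil hne]
    · simp only [List.foldl_cons, if_pos hc]
      rw [ih ls (cur ++ [c])]
      simp [mySplit, hc]

lemma delim_eq_alt (line : String) : delim line = delim_alt line := by
  unfold delim delim_alt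
  simp only []
  rw [loop_eq line.toList [] []]
  have hsep : (" " : String).toList = [' '] := by decide
  rw [PySem.Str.split?, hsep, PySem.Chars.split?]
  simp only [List.isEmpty_cons, Bool.false_eq_true, if_false, Option.map_some,
    List.nil_append, List.reverse_nil, splitOn_space]
  rw [PySem.List.slice_to_neg_one]
  rw [pyfilter]
  rw [show (fun (outLS : List String) (i : String) => if i ∉ ([""] : List String) then outLS ++ [i] else outLS)
        = (fun outLS i => if (i != "") = true then outLS ++ [i] else outLS) from by
      funext o i; simp]
  rw [PySem.List.foldl_append_if (fun i => i != "") (fun i => i)]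
  simp [List.map_dropLast]

-- ===== VERDICT (by name: the statement is the Claim_ definition above) =====
theorem delim_spec : Claim_equal_delim := by
  intro line _
  unfold Spec_delim
  exact delim_eq_alt line
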